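-- pv_equiv track=rewrite | github.com/MWATelescope/mwa_pb | pb/measured_beamformer.py | delayset2delaylines
-- ===== SOURCE A (Python) =====
-- def delayset2delaylines(delayset):
--   """
--      Calculate an array of 5 delay line flags based on the delay setting.
--      NOT VECTOR.
--   """
--   # See if we have a valid delay setting
--   if delayset < 0 or delayset > 63:
--     raise ValueError("Invalid Delay Setting %s" % repr(delayset))
--
--   # Delay settings with the MSB set are turned off, return None
--   if delayset > 31:
--     return None
--
--   # Iterate through delaylines
--   t = delayset
--   dlines = [False] * 5
--   for i in range(4, -1, -1):
--     if t >= 2 ** i: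
--       t = t - 2 ** i
--       dlines[i] = True
--
--   return dlines
-- ===== SOURCE B (Python) =====
-- def delayset2delaylines(delayset):
--   """
--      Calculate an array of 5 delay line flags based on the delay setting.
--      NOT VECTOR.
--   """
--   # See if we have a valid delay setting
--   if delayset < 0 or delayset > 63:
--     raise ValueError("Invalid Delay Setting %s" % repr(delayset))
--
--   # Delay settings with the MSB set are turned off, return None
--   if delayset > 31:
--     return None
--
--   # Each flag is just one bit of the setting: extract bits directly.
--   return [(delayset >> i) & 1 == 1 for i in range(5)]
-- ===== Notes on version B (the rewrite author's own statement) =====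
-- stated objective: idiomatic
-- what changed: Replaced the MSB-to-LSB greedy subtract-accumulator loop that mutates a preallocated list with a direct per-bit mask extraction comprehension that keeps no running remainder.
import Mathlib
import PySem

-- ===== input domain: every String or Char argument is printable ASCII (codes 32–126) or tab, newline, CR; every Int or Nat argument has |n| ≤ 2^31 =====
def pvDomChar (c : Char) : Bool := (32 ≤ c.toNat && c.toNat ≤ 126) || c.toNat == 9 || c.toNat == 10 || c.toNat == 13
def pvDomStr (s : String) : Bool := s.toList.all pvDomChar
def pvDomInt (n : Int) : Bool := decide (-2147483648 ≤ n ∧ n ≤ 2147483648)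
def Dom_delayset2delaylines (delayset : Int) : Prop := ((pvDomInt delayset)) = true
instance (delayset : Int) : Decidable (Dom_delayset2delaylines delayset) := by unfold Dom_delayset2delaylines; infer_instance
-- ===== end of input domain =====

-- B replaces A's greedy subtract-with-accumulator loop by direct per-bit mask extraction (idiomatic decomposition; same cost).


-- ===== PORT A =====
-- Literal port of A: after the guards, iterate i = 4..0, subtracting 2**i from the
-- running remainder t and setting dlines[i] when t >= 2**i.
def delayset2delaylines (delayset : Int) : Option (List Bool) :=
  -- the 'delayset < 0 or delayset > 63' raise is excluded by Pre_
  if delayset > 31 then none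
  else
    let st := [4, 3, 2, 1, 0].foldl
      (fun (st : Int × List Bool) (i : Nat) =>
        if st.1 ≥ (2 : Int) ^ i then (st.1 - (2 : Int) ^ i, st.2.set i true) else st)
      (delayset, [false, false, false, false, false])
    some st.2

-- ===== PORT B =====
-- Literal port of B: '[(delayset >> i) & 1 == 1 for i in range(5)]'.
def delayset2delaylines_alt (delayset : Int) : Option (List Bool) :=
  if delayset > 31 then none
  else some ((List.range 5).map (fun i => Int.land (Int.shiftRight delayset i) 1 == 1))

-- ===== PRECONDITION & SPEC =====
-- Pre_ excludes exactly the inputs where A raises ValueError (delayset < 0 or > 63).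
def Pre_delayset2delaylines (delayset : Int) : Prop := 0 ≤ delayset ∧ delayset ≤ 63
instance (delayset : Int) : Decidable (Pre_delayset2delaylines delayset) := by
  unfold Pre_delayset2delaylines; infer_instance
def pvWitness_delayset2delaylines : Int := (12)

def Spec_delayset2delaylines (delayset : Int) (out : Option (List Bool)) : Prop :=
  out = delayset2delaylines_alt delayset
instance (delayset : Int) (out : Option (List Bool)) : Decidable (Spec_delayset2delaylines delayset out) := by
  unfold Spec_delayset2delaylines; infer_instance

-- ===== CLAIM (what is proved, stated in full; the proofs are below) =====
def Claim_equal_delayset2delaylines : Prop :=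
  ∀ (delayset : Int), Dom_delayset2delaylines delayset →
    Pre_delayset2delaylines delayset →
    Spec_delayset2delaylines delayset (delayset2delaylines delayset)

-- ===== LEMMAS AND PROOFS =====

-- ===== VERDICT (by name: the statement is the Claim_ definition above) =====
theorem delayset2delaylines_spec : Claim_equal_delayset2delaylines := by
  intro d _ hp
  obtain ⟨h0, h1⟩ := hp
  unfold Spec_delayset2delaylines
  interval_cases d <;> decide
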